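-- pv_equiv track=rewrite | github.com/dneff/adventofcode | python/2017/09/solution1.py | calculate_group_score
-- ===== SOURCE A (Python) =====
-- def calculate_group_score(stream):
--     """
--     Calculate the total score of all groups in the stream.
--
--     Each group's score equals its nesting depth. The score is the sum of all group scores.
--
--     Args:
--         stream: Clean string containing only {} and commas
--
--     Returns:
--         Total score of all groups
--     """
--     total_score = 0
--     nesting_depth = 0
--     offset = 0
--
--     while offset < len(stream):
--         if stream[offset] == '{':
--             nesting_depth += 1
--         elif stream[offset] == '}':
--             total_score += nesting_depth
--             nesting_depth -= 1
--         offset += 1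
--
--     return total_score
-- ===== SOURCE B (Python) =====
-- def calculate_group_score(stream):
--     # Build an exclusive prefix-sum table of depth changes (depths[i] = nesting
--     # depth just before stream[i]), then sum the depths at the '}' positions.
--     depths = [0]
--     for c in stream:
--         depths.append(depths[-1] + (1 if c == '{' else -1 if c == '}' else 0))
--     return sum(d for d, c in zip(depths, stream) if c == '}')
-- ===== Notes on version B (the rewrite author's own statement) =====
-- stated objective: alternative
-- what changed: Replaces the single stateful while-loop (running total and depth updated per character) by a two-phase computation: first a prefix-sum table of exclusive running depths, then a separate sum of the table entries at close-brace positions.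
import Mathlib
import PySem

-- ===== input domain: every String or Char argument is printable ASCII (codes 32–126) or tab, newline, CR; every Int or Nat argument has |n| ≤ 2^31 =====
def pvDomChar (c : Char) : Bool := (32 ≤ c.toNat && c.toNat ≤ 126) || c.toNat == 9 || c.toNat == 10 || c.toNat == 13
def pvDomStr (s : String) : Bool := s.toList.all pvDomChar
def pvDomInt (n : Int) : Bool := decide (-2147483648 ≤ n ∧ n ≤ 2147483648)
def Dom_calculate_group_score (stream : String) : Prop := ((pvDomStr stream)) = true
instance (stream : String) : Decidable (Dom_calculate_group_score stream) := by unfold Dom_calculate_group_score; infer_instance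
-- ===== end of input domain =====

-- B replaces A's single stateful scan by a prefix-sum table of exclusive depths
-- consumed in a second pass (objective: alternative; same cost).

-- ===== PORT A =====
-- A's while-loop over offsets, reading one character per step: transcribed as
-- structural recursion over the character list with the same (total, depth) state.
def pvLoopA : List Char → Int → Int → Int
  | [], total, _ => total
  | c :: rest, total, depth =>
    if c = '{' then pvLoopA rest total (depth + 1)
    else if c = '}' then pvLoopA rest (total + depth) (depth - 1)
    else pvLoopA rest total depth

def calculate_group_score (stream : String) : Int :=
  pvLoopA stream.toList 0 0

-- ===== PORT B =====
-- depths: the list [0, d1, d2, …] built by B's first loop (exclusive prefix sums).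
def pvDepths : List Char → Int → List Int
  | [], d => [d]
  | c :: rest, d =>
      d :: pvDepths rest (d + (if c = '{' then 1 else if c = '}' then -1 else 0))

def calculate_group_score_alt (stream : String) : Int :=
  let cs := stream.toList
  let depths := pvDepths cs 0
  ((((depths.zip cs).filter (fun p => p.2 = '}')).map Prod.fst)).sum

-- ===== PRECONDITION & SPEC =====
def Spec_calculate_group_score (stream : String) (out : Int) : Prop := out = calculate_group_score_alt stream
instance (stream : String) (out : Int) : Decidable (Spec_calculate_group_score stream out) := by unfold Spec_calculate_group_score; infer_instance

-- ===== CLAIM (what is proved, stated in full; the proofs are below) =====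
def Claim_equal_calculate_group_score : Prop := ∀ (stream : String), Dom_calculate_group_score stream → Spec_calculate_group_score stream (calculate_group_score stream)

-- ===== LEMMAS AND PROOFS =====
theorem pvLoopA_eq (cs : List Char) : ∀ (total d : Int),
    pvLoopA cs total d =
      total + ((((pvDepths cs d).zip cs).filter (fun p => p.2 = '}')).map Prod.fst).sum := by
  induction cs with
  | nil => intro total d; simp [pvLoopA, pvDepths]
  | cons c rest ih =>
    intro total d
    by_cases h1 : c = '{'
    · simp [pvLoopA, pvDepths, h1, ih]
    · by_cases h2 : c = '}'
      · simp [pvLoopA, pvDepths, h2, ih]; ring_nf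
      · simp [pvLoopA, pvDepths, h1, h2, ih]

-- ===== VERDICT (by name: the statement is the Claim_ definition above) =====
theorem calculate_group_score_spec : Claim_equal_calculate_group_score := by
  intro stream _
  unfold Spec_calculate_group_score calculate_group_score calculate_group_score_alt
  simp [pvLoopA_eq]
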